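-- pv_equiv track=rewrite | github.com/alenisaw/smartcampus_v2t | src/pipeline/video_to_text.py | _dedupe_repeated_words
-- ===== SOURCE A (Python) =====
-- from typing import Any, Dict, List, Optional, Tuple
--
-- def _dedupe_repeated_words(text: str, max_repeat: int = 2) -> str:
--     words = (text or "").split()
--     out: List[str] = []
--     run_word: Optional[str] = None
--     run_len = 0
--     for w in words:
--         key = w.lower()
--         if key == run_word:
--             run_len += 1
--             if run_len >= max_repeat:
--                 continue
--         else:
--             run_word = key
--             run_len = 0
--         out.append(w)
--     t = " ".join(out).strip()
--     if t and t[-1] not in ".!?":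
--         t += "."
--     return t
-- ===== SOURCE B (Python) =====
-- def _dedupe_repeated_words(text: str, max_repeat: int = 2) -> str:
--     # Stateless sliding-window test: word i is dropped exactly when the
--     # previous `keep` words all share its lowercase form.
--     keep = max(max_repeat, 1)
--     words = (text or "").split()
--     lw = [w.lower() for w in words]
--     kept = [w for i, w in enumerate(words)
--             if i < keep or any(lw[j] != lw[i] for j in range(i - keep, i))]
--     t = " ".join(kept).strip()
--     if t and t[-1] not in ".!?":
--         t += "."
--     return t
-- ===== Notes on version B (the rewrite author's own statement) =====
-- stated objective: alternative
-- what changed: Replaces A's stateful run_word/run_len counter loop by a stateless per-word criterion: first lowercase all words, then keep word i iff i < keep or some of the previous keep words differs from it in lowercase (a look-back window test over indices, O(n*k)), then the same join/strip/period tail.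
import Mathlib
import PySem

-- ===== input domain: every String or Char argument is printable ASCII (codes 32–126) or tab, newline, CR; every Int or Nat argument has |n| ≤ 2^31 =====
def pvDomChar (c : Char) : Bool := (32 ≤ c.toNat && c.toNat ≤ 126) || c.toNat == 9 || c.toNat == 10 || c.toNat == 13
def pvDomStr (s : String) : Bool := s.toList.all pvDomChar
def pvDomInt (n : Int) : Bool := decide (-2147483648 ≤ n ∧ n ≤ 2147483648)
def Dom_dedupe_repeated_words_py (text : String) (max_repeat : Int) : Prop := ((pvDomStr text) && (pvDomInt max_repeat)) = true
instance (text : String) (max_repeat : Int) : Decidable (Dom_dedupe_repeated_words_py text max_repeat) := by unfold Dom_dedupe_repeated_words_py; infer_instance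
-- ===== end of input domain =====

-- B replaces A's stateful run_word/run_len counter loop by a stateless per-word
-- look-back-window test over indices of the lowercased word list; same return value.

-- shared tail: '" ".join(out).strip()' then append '.' unless empty or already ends in ".!?"
-- (this code is literally identical in both Pythons)
def pvFinishText (out : List String) : String :=
  let t := PySem.Str.strip (PySem.Str.join " " out)
  match PySem.Str.pyGet? t (-1) with
  | none => t
  | some c => if c ∈ ['.', '!', '?'] then t else t ++ "."

-- ===== PORT A =====
-- the for-loop of A over words, state (run_word, run_len, out)
def pvLoopA (m : Int) : List String → Option String → Int → List String → List String
  | [], _, _, out => out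
  | w :: ws, run_word, run_len, out =>
    let key := PySem.Str.lower w
    if some key = run_word then
      let rl := run_len + 1
      if rl ≥ m then pvLoopA m ws run_word rl out
      else pvLoopA m ws run_word rl (out ++ [w])
    else pvLoopA m ws (some key) 0 (out ++ [w])

def dedupe_repeated_words_py (text : String) (max_repeat : Int) : String :=
  let s := if text = "" then "" else text
  let words := PySem.Str.split₀ s
  pvFinishText (pvLoopA max_repeat words none 0 [])

-- ===== PORT B =====
-- the per-word filter condition of B: 'i < keep or any(lw[j] != lw[i] for j in range(i-keep, i))'
def pvCond (lw : List String) (keep : Int) (i : Int) : Bool :=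
  decide (i < keep) ||
    (PySem.List.pyRange (i - keep) i 1).any
      (fun j => !(PySem.List.pyGetD lw j "" == PySem.List.pyGetD lw i ""))

def dedupe_repeated_words_py_alt (text : String) (max_repeat : Int) : String :=
  let keep := max max_repeat 1
  let words := PySem.Str.split₀ (if text = "" then "" else text)
  let lw := words.map PySem.Str.lower
  let kept := (PySem.List.enumerate words 0).filterMap
    (fun p => if pvCond lw keep p.1 = true then some p.2 else none)
  pvFinishText kept

-- ===== PRECONDITION & SPEC =====
def Spec_dedupe_repeated_words_py (text : String) (max_repeat : Int) (out : String) : Prop := out = dedupe_repeated_words_py_alt text max_repeat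
instance (text : String) (max_repeat : Int) (out : String) : Decidable (Spec_dedupe_repeated_words_py text max_repeat out) := by unfold Spec_dedupe_repeated_words_py; infer_instance

-- ===== CLAIM (what is proved, stated in full; the proofs are below) =====
def Claim_equal_dedupe_repeated_words_py : Prop := ∀ (text : String) (max_repeat : Int), Dom_dedupe_repeated_words_py text max_repeat → Spec_dedupe_repeated_words_py text max_repeat (dedupe_repeated_words_py text max_repeat)

-- ===== LEMMAS AND PROOFS =====

-- the common normal form: consecutive lowercase-equal groups, keep the first k of each
def pvGroupbyLower : List String → List (List String)
  | [] => []
  | w :: ws =>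
    (w :: ws.takeWhile (fun x => PySem.Str.lower x == PySem.Str.lower w))
      :: pvGroupbyLower (ws.dropWhile (fun x => PySem.Str.lower x == PySem.Str.lower w))
termination_by ws => ws.length
decreasing_by
  exact Nat.lt_succ_of_le (List.length_dropWhile_le _ _)

-- ---- A-side: the counter loop produces the grouped/take normal form ----

theorem pvLoopA_run (m : Int) (key : String) (t : List String) :
    ∀ (rest : List String) (rl : Int) (out : List String),
    (∀ x ∈ t, PySem.Str.lower x = key) →
    pvLoopA m (t ++ rest) (some key) rl out =
      pvLoopA m rest (some key) (rl + t.length) (out ++ t.take (m - rl - 1).toNat) := by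
  induction t with
  | nil => intro rest rl out _; simp
  | cons x t' ih =>
    intro rest rl out h
    have hx : PySem.Str.lower x = key := h x (by simp)
    have ht' : ∀ y ∈ t', PySem.Str.lower y = key := fun y hy => h y (by simp [hy])
    simp only [List.cons_append, pvLoopA, hx]
    rw [if_pos trivial]
    by_cases hge : rl + 1 ≥ m
    · rw [if_pos hge, ih rest (rl + 1) out ht']
      have h1 : (m - rl - 1).toNat = 0 := by omega
      have h2 : (m - (rl + 1) - 1).toNat = 0 := by omega
      have h3 : rl + 1 + (t'.length : Int) = rl + ((t'.length : Int) + 1) := by ring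
      simp [h1, h2, h3]
    · rw [if_neg hge, ih rest (rl + 1) (out ++ [x]) ht']
      have h1 : (m - rl - 1).toNat = (m - (rl + 1) - 1).toNat + 1 := by omega
      have h3 : rl + 1 + (t'.length : Int) = rl + ((t'.length : Int) + 1) := by ring
      simp [h1, h3, List.take_succ_cons]

theorem pvLoopA_eq_groups (m : Int) (ws : List String) (rw : Option String) (rl : Int)
    (out : List String)
    (h : ∀ w, ws.head? = some w → some (PySem.Str.lower w) ≠ rw) :
    pvLoopA m ws rw rl out =
      out ++ (pvGroupbyLower ws).flatMap (fun g => g.take (max m 1).toNat) := by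
  have main : ∀ (n : Nat) (ws : List String), ws.length ≤ n →
      ∀ (rw : Option String) (rl : Int) (out : List String),
      (∀ w, ws.head? = some w → some (PySem.Str.lower w) ≠ rw) →
      pvLoopA m ws rw rl out =
        out ++ (pvGroupbyLower ws).flatMap (fun g => g.take (max m 1).toNat) := by
    intro n
    induction n with
    | zero =>
      intro ws hlen
      have hnil : ws = [] := List.eq_nil_of_length_eq_zero (Nat.le_zero.mp hlen)
      subst hnil
      intro rw rl out _; simp [pvLoopA, pvGroupbyLower]
    | succ n ih =>
      intro ws hlen
      match ws with
      | [] => intro rw rl out _; simp [pvLoopA, pvGroupbyLower]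
      | w :: ws' =>
        intro rw rl out h
        have hne : ¬ some (PySem.Str.lower w) = rw := h w rfl
        have hsplit : ws' = ws'.takeWhile (fun x => PySem.Str.lower x == PySem.Str.lower w)
            ++ ws'.dropWhile (fun x => PySem.Str.lower x == PySem.Str.lower w) :=
          (List.takeWhile_append_dropWhile).symm
        have htw : ∀ x ∈ ws'.takeWhile (fun x => PySem.Str.lower x == PySem.Str.lower w),
            PySem.Str.lower x = PySem.Str.lower w := by
          intro x hx
          have := List.mem_takeWhile_imp hx
          simpa using this
        have hdw : ∀ v, (ws'.dropWhile (fun x => PySem.Str.lower x == PySem.Str.lower w)).head? = some v →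
            some (PySem.Str.lower v) ≠ some (PySem.Str.lower w) := by
          intro v hv hcontra
          have := List.head?_dropWhile_not (fun x => PySem.Str.lower x == PySem.Str.lower w) ws'
          rw [hv] at this
          simp at this
          exact this (by simpa using hcontra)
        simp only [pvLoopA]
        rw [if_neg hne]
        conv_lhs => rw [hsplit]
        rw [pvLoopA_run m (PySem.Str.lower w) _ _ 0 (out ++ [w]) htw]
        rw [ih _ (by
            have h1 := List.length_dropWhile_le
              (fun x => PySem.Str.lower x == PySem.Str.lower w) ws'
            simp at hlen; omega) (some (PySem.Str.lower w)) _ _ hdw]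
        have hgb : pvGroupbyLower (w :: ws') =
            (w :: ws'.takeWhile (fun x => PySem.Str.lower x == PySem.Str.lower w))
              :: pvGroupbyLower (ws'.dropWhile (fun x => PySem.Str.lower x == PySem.Str.lower w)) := by
          rw [pvGroupbyLower]
        rw [hgb]
        have hk : (max m 1).toNat = (m - 0 - 1).toNat + 1 := by omega
        simp [hk, List.take_succ_cons, List.flatMap_cons]
  exact main ws.length ws le_rfl rw rl out h

-- ---- B-side: the window filter produces the same grouped/take normal form ----

-- on a block whose condition at offset k is exactly 'k < keep', filtering is taking
theorem pvFilterEnum_take (c : Int → Bool) :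
    ∀ (g : List String) (s keep : Int),
    (∀ k : Nat, k < g.length → (c (s + (k : Int)) = true ↔ (k : Int) < keep)) →
    (PySem.List.enumerate g s).filterMap (fun p => if c p.1 = true then some p.2 else none)
      = g.take keep.toNat := by
  intro g
  induction g with
  | nil => intro s keep _; simp [PySem.List.enumerate_nil]
  | cons w g' ih =>
    intro s keep h
    have h0 := h 0 (by simp)
    have hrec : ∀ k : Nat, k < g'.length → (c (s + 1 + (k : Int)) = true ↔ (k : Int) < keep - 1) := by
      intro k hk
      have := h (k + 1) (by simp; omega)
      have harg : s + ((k : Nat) + 1 : Nat) = s + 1 + (k : Int) := by push_cast; ring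
      rw [harg] at this
      rw [this]
      constructor <;> intro <;> push_cast at * <;> omega
    rw [PySem.List.enumerate_cons, List.filterMap_cons, ih (s + 1) (keep - 1) hrec]
    by_cases hkp : 0 < keep
    · have hc : c s = true := by
        have := h0.mpr (by simpa using hkp)
        simpa using this
      have ht : keep.toNat = (keep - 1).toNat + 1 := by omega
      rw [ht]
      simp [hc, List.take_succ_cons]
    · have hc : ¬ c (s + (0:Nat)) = true := by rw [h0]; omega
      have hc' : ¬ c s = true := by simpa using hc
      have h1 : keep.toNat = 0 := by omega
      have h2 : (keep - 1).toNat = 0 := by omega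
      simp [hc', h1, h2]

-- within a maximal lowercase-equal group starting at index s, the window condition
-- at global index s + k holds exactly when k < keep
theorem pvCond_group (lw : List String) (keep : Int) (s gl : Nat) (key : String)
    (hmem : ∀ k : Nat, k < gl → lw.getD (s + k) "" = key)
    (hb : s = 0 ∨ lw.getD (s - 1) "" ≠ key) :
    ∀ k : Nat, k < gl → (pvCond lw keep ((s : Int) + (k : Int)) = true ↔ (k : Int) < keep) := by
  intro k hkgl
  unfold pvCond
  constructor
  · intro hc
    by_contra hlt
    push_neg at hlt
    -- keep ≤ k: both disjuncts are false
    rw [Bool.or_eq_true] at hc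
    rcases hc with hlhs | hany
    · have := of_decide_eq_true hlhs; omega
    · rcases List.any_eq_true.mp hany with ⟨j, hjmem, hj⟩
      rcases (PySem.List.mem_pyRange_one).mp hjmem with ⟨hj1, hj2⟩
      -- j lies inside the group: j = s + j' with j' < gl
      have hjs : (s : Int) ≤ j := by omega
      obtain ⟨j', hj'⟩ : ∃ j' : Nat, j = (s : Int) + (j' : Int) := ⟨(j - s).toNat, by omega⟩
      have hj'lt : j' < gl := by omega
      have he1 : PySem.List.pyGetD lw j "" = key := by
        rw [hj']
        have : ((s : Int) + (j' : Int)) = ((s + j' : Nat) : Int) := by push_cast; ring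
        rw [this, PySem.List.pyGetD_natCast]
        exact hmem j' hj'lt
      have he2 : PySem.List.pyGetD lw ((s : Int) + (k : Int)) "" = key := by
        have : ((s : Int) + (k : Int)) = ((s + k : Nat) : Int) := by push_cast; ring
        rw [this, PySem.List.pyGetD_natCast]
        exact hmem k hkgl
      rw [he1, he2] at hj
      simp at hj
  · intro hklt
    by_cases hik : (s : Int) + (k : Int) < keep
    · rw [Bool.or_eq_true]
      exact Or.inl (decide_eq_true hik)
    · -- i ≥ keep, so s ≥ 1; witness j = s - 1 differs from the key
      have hs1 : 1 ≤ s := by omega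
      rw [Bool.or_eq_true]
      refine Or.inr (List.any_eq_true.mpr ⟨(s : Int) - 1, ?_, ?_⟩)
      · exact (PySem.List.mem_pyRange_one).mpr ⟨by omega, by omega⟩
      · have hb' : lw.getD (s - 1) "" ≠ key := by
          rcases hb with h0 | hne
          · omega
          · exact hne
        have he1 : PySem.List.pyGetD lw ((s : Int) - 1) "" = lw.getD (s - 1) "" := by
          have : ((s : Int) - 1) = ((s - 1 : Nat) : Int) := by omega
          rw [this, PySem.List.pyGetD_natCast]
        have he2 : PySem.List.pyGetD lw ((s : Int) + (k : Int)) "" = key := by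
          have : ((s : Int) + (k : Int)) = ((s + k : Nat) : Int) := by push_cast; ring
          rw [this, PySem.List.pyGetD_natCast]
          exact hmem k hkgl
        rw [he1, he2]
        simpa using hb'

-- the window filter over a suffix starting at index s equals the grouped/take form
theorem pvFilter_eq_groups (lw : List String) (keep : Int) (hk : 1 ≤ keep) :
    ∀ (n : Nat) (ws : List String), ws.length ≤ n → ∀ s : Nat,
    lw.drop s = ws.map PySem.Str.lower →
    (s = 0 ∨ ∀ w, ws.head? = some w → lw.getD (s - 1) "" ≠ PySem.Str.lower w) →
    (PySem.List.enumerate ws (s : Int)).filterMap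
        (fun p => if pvCond lw keep p.1 = true then some p.2 else none)
      = (pvGroupbyLower ws).flatMap (fun g => g.take keep.toNat) := by
  intro n
  induction n with
  | zero =>
    intro ws hlen
    have hnil : ws = [] := List.eq_nil_of_length_eq_zero (Nat.le_zero.mp hlen)
    subst hnil
    intro s _ _; simp [PySem.List.enumerate_nil, pvGroupbyLower]
  | succ n ih =>
    intro ws hlen
    match ws with
    | [] => intro s _ _; simp [PySem.List.enumerate_nil, pvGroupbyLower]
    | w :: ws' =>
      intro s hdrop hb
      set key := PySem.Str.lower w with hkey
      set g := w :: ws'.takeWhile (fun x => PySem.Str.lower x == key) with hg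
      set rest := ws'.dropWhile (fun x => PySem.Str.lower x == key) with hrest
      have hsplit : w :: ws' = g ++ rest := by
        simp [hg, hrest, List.takeWhile_append_dropWhile]
      have hgmem : ∀ x ∈ g, PySem.Str.lower x = key := by
        intro x hx
        rcases List.mem_cons.mp hx with h1 | h2
        · rw [h1]
        · simpa using List.mem_takeWhile_imp h2
      -- pointwise description of lw on the suffix
      have hpt : ∀ j : Nat, j < (w :: ws').length →
          lw.getD (s + j) "" = PySem.Str.lower ((w :: ws').getD j "") := by
        intro j hj
        have h1 : lw[s + j]? = (List.map PySem.Str.lower (w :: ws'))[j]? := by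
          rw [← hdrop, List.getElem?_drop]
        have h2 : (List.map PySem.Str.lower (w :: ws'))[j]? =
            some (PySem.Str.lower ((w :: ws')[j])) := by
          rw [List.getElem?_map, List.getElem?_eq_getElem hj]
          rfl
        rw [List.getD_eq_getElem?_getD, h1, h2, List.getD_eq_getElem?_getD,
          List.getElem?_eq_getElem hj]
        rfl
      have hglen : g.length ≤ (w :: ws').length := by
        rw [hsplit]; simp
      have hmem : ∀ k : Nat, k < g.length → lw.getD (s + k) "" = key := by
        intro k hkg
        have h1 := hpt k (by omega)
        have h2 : (w :: ws').getD k "" = g.getD k "" := by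
          rw [hsplit]
          simp [List.getD_eq_getElem?_getD, List.getElem?_append_left hkg]
        rw [h2] at h1
        rw [h1]
        apply hgmem
        have : g.getD k "" = g[k] := by simp [List.getD_eq_getElem?_getD, hkg]
        rw [this]
        exact List.getElem_mem hkg
      have hb' : s = 0 ∨ lw.getD (s - 1) "" ≠ key := by
        rcases hb with h0 | hr
        · exact Or.inl h0
        · exact Or.inr (hr w rfl)
      -- split the enumeration at the group boundary
      have henum : PySem.List.enumerate (w :: ws') (s : Int) =
          PySem.List.enumerate g (s : Int) ++ PySem.List.enumerate rest ((s : Int) + g.length) := by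
        conv_lhs => rw [hsplit]
        exact PySem.List.enumerate_append g rest (s : Int)
      rw [henum, List.filterMap_append]
      -- the group block: filter = take keep
      rw [pvFilterEnum_take (pvCond lw keep) g (s : Int) keep
            (pvCond_group lw keep s g.length key hmem hb')]
      -- the rest: induction hypothesis at s + g.length
      have hlrest : rest.length ≤ n := by
        have h1 := List.length_dropWhile_le (fun x => PySem.Str.lower x == key) ws'
        simp at hlen
        simp [hrest]
        omega
      have hdrop' : lw.drop (s + g.length) = rest.map PySem.Str.lower := by
        have h1 : lw.drop (s + g.length) = (lw.drop s).drop g.length := by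
          rw [List.drop_drop]
        rw [h1, hdrop, hsplit, List.map_append, List.drop_append_of_le_length (by simp)]
        simp
      have hbrest : (s + g.length) = 0 ∨ ∀ v, rest.head? = some v →
          lw.getD (s + g.length - 1) "" ≠ PySem.Str.lower v := by
        refine Or.inr ?_
        intro v hv
        have hlast : lw.getD (s + g.length - 1) "" = key := by
          have hgl : 1 ≤ g.length := by simp [hg]
          have : s + g.length - 1 = s + (g.length - 1) := by omega
          rw [this]
          exact hmem (g.length - 1) (by omega)
        rw [hlast]
        have := List.head?_dropWhile_not (fun x => PySem.Str.lower x == key) ws'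
        rw [← hrest, hv] at this
        simp at this
        intro hcontra
        exact this hcontra.symm
      have harg : ((s : Int) + g.length) = ((s + g.length : Nat) : Int) := by push_cast; ring
      rw [harg, ih rest hlrest (s + g.length) hdrop' hbrest]
      -- reassemble the groups
      have hgb : pvGroupbyLower (w :: ws') = g :: pvGroupbyLower rest := by
        rw [pvGroupbyLower]
      rw [hgb, List.flatMap_cons]

-- ===== VERDICT (by name: the statement is the Claim_ definition above) =====
theorem dedupe_repeated_words_py_spec : Claim_equal_dedupe_repeated_words_py := by
  intro text max_repeat _
  unfold Spec_dedupe_repeated_words_py dedupe_repeated_words_py dedupe_repeated_words_py_alt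
  simp only []
  rw [pvLoopA_eq_groups max_repeat _ none 0 [] (by intro w _; simp)]
  have h0 : ((0 : Int)) = ((0 : Nat) : Int) := rfl
  rw [h0, pvFilter_eq_groups (((PySem.Str.split₀ (if text = "" then "" else text)).map PySem.Str.lower))
        (max max_repeat 1) (by omega)
        (PySem.Str.split₀ (if text = "" then "" else text)).length
        (PySem.Str.split₀ (if text = "" then "" else text)) le_rfl 0 (by simp) (Or.inl rfl)]
  simp
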